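-- pv_equiv track=rewrite | github.com/Rupert-WLLP-Bai/HKU-CS | Semester 2/COMP7404D - Computational intelligence and machine learning/a1/p6.py | number_of_attacks
-- ===== SOURCE A (Python) =====
-- def number_of_attacks(problem):
--     n = len(problem)
--     # Create a board of size n x n initialized to 0
--     attack_matrix = [[0] * n for _ in range(n)]
--
--     # Iterate over every square on the board
--     for row in range(n):
--         for col in range(n):
--             # Store the attack count for this square
--             attack_matrix[row][col] = calculate_attack_cost(row, col, problem)
--     # Return the matrix
--     attack_matrix_str = '\n'.join([' '.join([f'{cell:2}' for cell in row]) for row in attack_matrix])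
--     return attack_matrix_str
--
-- def calculate_attack_cost(x, y, q_positions):
--     attack_cost = 0
--     n = len(q_positions)
--     q_positions = q_positions.copy() # make a copy of the current queen positions
--
--     # 0. move the queen from the same column to (x, y)
--     q_positions[y] = x
--
--     # 1. check the row and diagonal attacks
--     for i in range(n):
--         for j in range(i+1, n):
--             if abs(i - j) == abs(q_positions[i] - q_positions[j]):
--                 attack_cost += 1
--             elif q_positions[i] == q_positions[j]:
--                 attack_cost += 1
--
--     return attack_cost
-- ===== SOURCE B (Python) =====
-- def number_of_attacks(problem):
--     n = len(problem)
--     # occupancy counters: rows, "/" diagonals (v - j), "\" diagonals (v + j)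
--     cnt_row = {}
--     for j in range(n):
--         v = problem[j]
--         cnt_row[v] = cnt_row.get(v, 0) + 1
--     cnt_d1 = {}
--     for j in range(n):
--         v = problem[j] - j
--         cnt_d1[v] = cnt_d1.get(v, 0) + 1
--     cnt_d2 = {}
--     for j in range(n):
--         v = problem[j] + j
--         cnt_d2[v] = cnt_d2.get(v, 0) + 1
--     # attacking pairs on the given board
--     total = 0
--     for j in range(n):
--         for i in range(j):
--             if abs(i - j) == abs(problem[i] - problem[j]) or problem[i] == problem[j]:
--                 total += 1
--
--     def contrib(col, row):
--         # pairs between a queen at (row, col) and the queens of the other columns: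
--         # the three attack conditions are mutually exclusive for j != col
--         c = cnt_row.get(row, 0) + cnt_d1.get(row - col, 0) + cnt_d2.get(row + col, 0)
--         if problem[col] == row:
--             c -= 3  # remove queen col's own three counter entries
--         return c
--
--     # base[col]: attacking pairs among the queens other than queen col
--     base = [total - contrib(col, problem[col]) for col in range(n)]
--     rows = []
--     for row in range(n):
--         rows.append(' '.join(f'{base[col] + contrib(col, row):2}' for col in range(n)))
--     return '\n'.join(rows)
-- ===== Notes on version B (the rewrite author's own statement) =====
-- stated objective: faster
-- what changed: Instead of recounting all attacking pairs from scratch for every square (O(n^2) per square), B builds row/diagonal occupancy counters and the total pair count once, and evaluates each square as total - contrib(col, problem[col]) + contrib(col, row) with O(1) counter lookups.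
import Mathlib
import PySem

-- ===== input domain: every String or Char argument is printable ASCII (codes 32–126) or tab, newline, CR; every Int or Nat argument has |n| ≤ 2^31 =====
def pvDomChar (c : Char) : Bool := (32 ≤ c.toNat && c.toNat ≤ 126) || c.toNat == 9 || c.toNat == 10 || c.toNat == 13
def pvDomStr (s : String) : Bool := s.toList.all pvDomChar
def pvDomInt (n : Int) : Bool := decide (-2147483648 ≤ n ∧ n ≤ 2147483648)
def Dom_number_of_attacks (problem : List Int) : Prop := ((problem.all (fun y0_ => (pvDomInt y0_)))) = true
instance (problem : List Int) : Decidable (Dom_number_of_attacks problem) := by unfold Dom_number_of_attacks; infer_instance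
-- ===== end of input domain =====

-- B is intended as faster: A recounts every attacking pair for every square (O(n^4)); B keeps
-- row/diagonal occupancy counters and a global pair total, and each square costs O(1) (O(n^2)).

-- f'{cell:2}' : str(cell) right-justified to width 2 with spaces (exact for width 2; str(cell) is never empty)
def pvFmt2 (cell : Int) : String :=
  let cs := PySem.Int.toChars cell
  String.ofList (if cs.length < 2 then ' ' :: cs else cs)

-- ===== PORT A =====
def calculate_attack_cost (x y : Int) (q_positions : List Int) : Int :=
  let n : Int := PySem.List.len q_positions
  let q := PySem.List.pySetD q_positions y x
  (PySem.List.pyRange 0 n 1).foldl (fun acc i =>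
    (PySem.List.pyRange (i + 1) n 1).foldl (fun acc j =>
      if (i - j).natAbs = (PySem.List.pyGetD q i 0 - PySem.List.pyGetD q j 0).natAbs then acc + 1
      else if PySem.List.pyGetD q i 0 = PySem.List.pyGetD q j 0 then acc + 1
      else acc) acc) 0

def number_of_attacks (problem : List Int) : String :=
  let n : Int := PySem.List.len problem
  let attack_matrix := (PySem.List.pyRange 0 n 1).map (fun row =>
    (PySem.List.pyRange 0 n 1).map (fun col => calculate_attack_cost row col problem))
  PySem.Str.join "\n" (attack_matrix.map (fun r => PySem.Str.join " " (r.map pvFmt2)))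

-- ===== PORT B =====
-- pairs between a queen placed at (row, col) and the queens of the other columns
def pvContrib (problem : List Int) (cnt_row cnt_d1 cnt_d2 : PySem.Dict Int Int) (col row : Int) : Int :=
  let c := cnt_row.getD row 0 + cnt_d1.getD (row - col) 0 + cnt_d2.getD (row + col) 0
  if PySem.List.pyGetD problem col 0 = row then c - 3 else c

def number_of_attacks_alt (problem : List Int) : String :=
  let n : Int := PySem.List.len problem
  let cnt_row := (PySem.List.pyRange 0 n 1).foldl (fun d j =>
    let v := PySem.List.pyGetD problem j 0
    d.insert v (d.getD v 0 + 1)) (PySem.Dict.empty : PySem.Dict Int Int)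
  let cnt_d1 := (PySem.List.pyRange 0 n 1).foldl (fun d j =>
    let v := PySem.List.pyGetD problem j 0 - j
    d.insert v (d.getD v 0 + 1)) (PySem.Dict.empty : PySem.Dict Int Int)
  let cnt_d2 := (PySem.List.pyRange 0 n 1).foldl (fun d j =>
    let v := PySem.List.pyGetD problem j 0 + j
    d.insert v (d.getD v 0 + 1)) (PySem.Dict.empty : PySem.Dict Int Int)
  let total := (PySem.List.pyRange 0 n 1).foldl (fun t j =>
    (PySem.List.pyRange 0 j 1).foldl (fun t i =>
      if (i - j).natAbs = (PySem.List.pyGetD problem i 0 - PySem.List.pyGetD problem j 0).natAbs ∨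
          PySem.List.pyGetD problem i 0 = PySem.List.pyGetD problem j 0 then t + 1
      else t) t) 0
  let base := (PySem.List.pyRange 0 n 1).map (fun col =>
    total - pvContrib problem cnt_row cnt_d1 cnt_d2 col (PySem.List.pyGetD problem col 0))
  let rows := (PySem.List.pyRange 0 n 1).map (fun row =>
    PySem.Str.join " " ((PySem.List.pyRange 0 n 1).map (fun col =>
      pvFmt2 (PySem.List.pyGetD base col 0 + pvContrib problem cnt_row cnt_d1 cnt_d2 col row))))
  PySem.Str.join "\n" rows

-- ===== PRECONDITION & SPEC =====
def Spec_number_of_attacks (problem : List Int) (out : String) : Prop := out = number_of_attacks_alt problem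
instance (problem : List Int) (out : String) : Decidable (Spec_number_of_attacks problem out) := by unfold Spec_number_of_attacks; infer_instance

-- ===== CLAIM (what is proved, stated in full; the proofs are below) =====
def Claim_equal_number_of_attacks : Prop := ∀ (problem : List Int), Dom_number_of_attacks problem → Spec_number_of_attacks problem (number_of_attacks problem)

-- ===== LEMMAS AND PROOFS =====

-- the attack indicator for a pair of squares (i, a), (j, b)
def pvAtt (i a j b : Int) : Int := if (i - j).natAbs = (a - b).natAbs ∨ a = b then 1 else 0

lemma pv_sum_pyRange_aux (f : Int → Int) : ∀ (m : ℕ) (a : Int),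
    ((PySem.List.pyRange a (a + m)).map f).sum = ∑ j ∈ Finset.Ico a (a + (m : Int)), f j := by
  intro m
  induction m with
  | zero => intro a; simp [PySem.List.pyRange_one_eq_nil]
  | succ k ih =>
    intro a
    have h1 : (a : Int) ≤ a + k := by omega
    have h2 : (a + ((k + 1 : ℕ) : Int)) = (a + (k : Int)) + 1 := by push_cast; ring
    rw [h2, PySem.List.pyRange_one_succ_right h1, List.map_append, List.sum_append]
    have h3 : Finset.Ico a (a + (k : Int) + 1) = insert (a + (k : Int)) (Finset.Ico a (a + (k : Int))) := by
      ext x; simp [Finset.mem_Ico]; try omega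
    rw [h3, Finset.sum_insert (by simp [Finset.mem_Ico])]
    rw [ih a]; simp; ring

lemma pv_sum_pyRange (a b : Int) (f : Int → Int) :
    ((PySem.List.pyRange a b).map f).sum = ∑ j ∈ Finset.Ico a b, f j := by
  by_cases h : b ≤ a
  · rw [PySem.List.pyRange_one_eq_nil h, Finset.Ico_eq_empty (by omega)]; simp
  · have hb : b = a + ((b - a).toNat : Int) := by omega
    rw [hb, pv_sum_pyRange_aux]

lemma pvAtt_symm (i a j b : Int) : pvAtt i a j b = pvAtt j b i a := by
  unfold pvAtt
  have h : ((i - j).natAbs = (a - b).natAbs ∨ a = b) ↔ ((j - i).natAbs = (b - a).natAbs ∨ b = a) := by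
    omega
  rw [if_congr h rfl rfl]

lemma pvP_set (problem : List Int) (row col k : Int)
    (h0 : 0 ≤ col) (h1 : col < (problem.length : Int))
    (k0 : 0 ≤ k) (_k1 : k < (problem.length : Int)) :
    PySem.List.pyGetD (PySem.List.pySetD problem col row) k 0
      = if k = col then row else PySem.List.pyGetD problem k 0 := by
  have hc : ((col.toNat : ℕ) : Int) = col := by omega
  have hk : ((k.toNat : ℕ) : Int) = k := by omega
  rw [← hc, ← hk,
    PySem.List.pyGetD_pySetD_natCast problem col.toNat k.toNat row 0 (by omega)]
  by_cases h : k.toNat = col.toNat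
  · rw [if_pos h, if_pos (show ((k.toNat : ℕ) : Int) = ((col.toNat : ℕ) : Int) by omega)]
  · rw [if_neg h, if_neg (show ¬((k.toNat : ℕ) : Int) = ((col.toNat : ℕ) : Int) by omega)]

-- the pair-splitting identity: all pairs of a board F
-- = pairs avoiding `col` (with the skipped terms) + pairs involving `col`
lemma pv_key (n col : Int) (h0 : 0 ≤ col) (h1 : col < n)
    (F F0 : Int → Int → Int) (A0 : Int → Int)
    (hcc : ∀ i ∈ Finset.Ico (0 : Int) col, F i col = A0 i)
    (hic : ∀ j ∈ Finset.Ico (0 : Int) n, col < j → F col j = A0 j)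
    (hoo : ∀ j ∈ Finset.Ico (0 : Int) n, ∀ i ∈ Finset.Ico (0 : Int) j,
              i ≠ col → j ≠ col → F i j = F0 i j) :
    ∑ j ∈ Finset.Ico (0 : Int) n, ∑ i ∈ Finset.Ico (0 : Int) j, F i j
      = (∑ j ∈ Finset.Ico (0 : Int) n,
          if j = col then 0 else ∑ i ∈ Finset.Ico (0 : Int) j, (if i ≠ col then F0 i j else 0))
        + ∑ j ∈ Finset.Ico (0 : Int) n, (if j ≠ col then A0 j else 0) := by
  have step1 : ∑ j ∈ Finset.Ico (0 : Int) n, ∑ i ∈ Finset.Ico (0 : Int) j, F i j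
      = ∑ j ∈ Finset.Ico (0 : Int) n,
          ((if j = col then 0 else ∑ i ∈ Finset.Ico (0 : Int) j, (if i ≠ col then F0 i j else 0))
            + (if col < j then A0 j else 0)
            + (if j = col then (∑ i ∈ Finset.Ico (0 : Int) col, A0 i) else 0)) := by
    refine Finset.sum_congr rfl (fun j hj => ?_)
    rw [Finset.mem_Ico] at hj
    by_cases hjc : j = col
    · subst hjc
      rw [if_pos rfl, if_pos rfl, if_neg (by omega)]
      rw [Finset.sum_congr rfl (fun i hi => hcc i hi)]
      ring
    · rw [if_neg hjc, if_neg hjc]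
      have : ∀ i ∈ Finset.Ico (0 : Int) j,
          F i j = (if i ≠ col then F0 i j else 0) + (if i = col then A0 j else 0) := by
        intro i hi
        by_cases hic' : i = col
        · subst hic'
          rw [Finset.mem_Ico] at hi
          rw [if_neg (by simp), if_pos rfl, hic j (by rw [Finset.mem_Ico]; omega) (by omega)]
          ring
        · rw [if_pos hic', if_neg hic', hoo j (by rw [Finset.mem_Ico]; omega) i hi hic' hjc]
          ring
      rw [Finset.sum_congr rfl this, Finset.sum_add_distrib, Finset.sum_ite_eq']
      by_cases hcj : col < j
      · rw [if_pos (by rw [Finset.mem_Ico]; omega), if_pos hcj]; ring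
      · rw [if_neg (by rw [Finset.mem_Ico]; omega), if_neg hcj]; ring
  rw [step1]
  rw [Finset.sum_add_distrib, Finset.sum_add_distrib, Finset.sum_ite_eq']
  rw [if_pos (by rw [Finset.mem_Ico]; omega)]
  have hsplit : ∀ j ∈ Finset.Ico (0 : Int) n,
      (if j ≠ col then A0 j else 0) = (if col < j then A0 j else 0) + (if j < col then A0 j else 0) := by
    intro j hj
    by_cases h : j = col
    · subst h; simp
    · rw [if_pos h]
      rcases lt_or_gt_of_ne h with hl | hg
      · rw [if_neg (by omega), if_pos hl]; ring
      · rw [if_pos hg, if_neg (by omega)]; ring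
  rw [Finset.sum_congr rfl hsplit, Finset.sum_add_distrib]
  have hlow : ∑ j ∈ Finset.Ico (0 : Int) n, (if j < col then A0 j else 0)
      = ∑ i ∈ Finset.Ico (0 : Int) col, A0 i := by
    rw [← Finset.sum_filter]
    refine Finset.sum_congr ?_ (fun _ _ => rfl)
    ext x; simp [Finset.mem_Ico]; omega
  rw [hlow]; ring

-- fold-to-sum bridge for A's inner pair loop
lemma pv_foldA (q : List Int) (n i : Int) (acc : Int) :
    (PySem.List.pyRange (i + 1) n).foldl (fun acc j =>
        if (i - j).natAbs = (PySem.List.pyGetD q i 0 - PySem.List.pyGetD q j 0).natAbs then acc + 1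
        else if PySem.List.pyGetD q i 0 = PySem.List.pyGetD q j 0 then acc + 1
        else acc) acc
      = acc + ∑ j ∈ Finset.Ico (i + 1) n,
          pvAtt i (PySem.List.pyGetD q i 0) j (PySem.List.pyGetD q j 0) := by
  have hb : (fun (acc j : Int) =>
        if (i - j).natAbs = (PySem.List.pyGetD q i 0 - PySem.List.pyGetD q j 0).natAbs then acc + 1
        else if PySem.List.pyGetD q i 0 = PySem.List.pyGetD q j 0 then acc + 1
        else acc)
      = fun acc j => acc + pvAtt i (PySem.List.pyGetD q i 0) j (PySem.List.pyGetD q j 0) := by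
    funext acc j
    unfold pvAtt
    split_ifs <;> omega
  rw [hb, PySem.List.foldl_add, pv_sum_pyRange]

lemma pv_foldA_outer (q : List Int) (n : Int) :
    (PySem.List.pyRange 0 n).foldl (fun acc i =>
        (PySem.List.pyRange (i + 1) n).foldl (fun acc j =>
          if (i - j).natAbs = (PySem.List.pyGetD q i 0 - PySem.List.pyGetD q j 0).natAbs then acc + 1
          else if PySem.List.pyGetD q i 0 = PySem.List.pyGetD q j 0 then acc + 1
          else acc) acc) 0
      = ∑ i ∈ Finset.Ico (0 : Int) n, ∑ j ∈ Finset.Ico (i + 1) n,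
          pvAtt i (PySem.List.pyGetD q i 0) j (PySem.List.pyGetD q j 0) := by
  have hb : (fun (acc i : Int) =>
        (PySem.List.pyRange (i + 1) n).foldl (fun acc j =>
          if (i - j).natAbs = (PySem.List.pyGetD q i 0 - PySem.List.pyGetD q j 0).natAbs then acc + 1
          else if PySem.List.pyGetD q i 0 = PySem.List.pyGetD q j 0 then acc + 1
          else acc) acc)
      = fun acc i => acc + ∑ j ∈ Finset.Ico (i + 1) n,
          pvAtt i (PySem.List.pyGetD q i 0) j (PySem.List.pyGetD q j 0) := by
    funext acc i
    exact pv_foldA q n i acc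
  rw [hb, PySem.List.foldl_add, pv_sum_pyRange, zero_add]

-- a counter dict built by repeated get-default/insert counts key occurrences
lemma pv_counter (f : Int → Int) : ∀ (l : List Int) (d : PySem.Dict Int Int) (v : Int),
    (l.foldl (fun d j => d.insert (f j) (d.getD (f j) 0 + 1)) d).getD v 0
      = d.getD v 0 + (l.map (fun j => if f j = v then (1 : Int) else 0)).sum := by
  intro l
  induction l with
  | nil => intro d v; simp
  | cons a l ih =>
    intro d v
    rw [List.foldl_cons, ih, List.map_cons, List.sum_cons, PySem.Dict.getD_insert]
    by_cases h : v = f a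
    · rw [if_pos h, if_pos (by omega), h]; ring
    · rw [if_neg h, if_neg (by omega)]; ring

-- fold-to-sum bridge for B's pair-total loop
lemma pv_total (problem : List Int) (n : Int) :
    (PySem.List.pyRange 0 n).foldl (fun t j =>
        (PySem.List.pyRange 0 j).foldl (fun t i =>
          if (i - j).natAbs = (PySem.List.pyGetD problem i 0 - PySem.List.pyGetD problem j 0).natAbs ∨
              PySem.List.pyGetD problem i 0 = PySem.List.pyGetD problem j 0 then t + 1
          else t) t) 0
      = ∑ j ∈ Finset.Ico (0 : Int) n, ∑ i ∈ Finset.Ico (0 : Int) j,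
          pvAtt i (PySem.List.pyGetD problem i 0) j (PySem.List.pyGetD problem j 0) := by
  have hb : (fun (t j : Int) =>
        (PySem.List.pyRange 0 j).foldl (fun t i =>
          if (i - j).natAbs = (PySem.List.pyGetD problem i 0 - PySem.List.pyGetD problem j 0).natAbs ∨
              PySem.List.pyGetD problem i 0 = PySem.List.pyGetD problem j 0 then t + 1
          else t) t)
      = fun t j => t + ∑ i ∈ Finset.Ico (0 : Int) j,
          pvAtt i (PySem.List.pyGetD problem i 0) j (PySem.List.pyGetD problem j 0) := by
    funext t j
    have hb2 : (fun (t i : Int) =>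
          if (i - j).natAbs = (PySem.List.pyGetD problem i 0 - PySem.List.pyGetD problem j 0).natAbs ∨
              PySem.List.pyGetD problem i 0 = PySem.List.pyGetD problem j 0 then t + 1
          else t)
        = fun t i => t + pvAtt i (PySem.List.pyGetD problem i 0) j (PySem.List.pyGetD problem j 0) := by
      funext t i
      unfold pvAtt
      split_ifs <;> omega
    rw [hb2, PySem.List.foldl_add, pv_sum_pyRange]
  rw [hb, PySem.List.foldl_add, pv_sum_pyRange, zero_add]

-- the three counters evaluate contrib exactly: occupancy lookups = the pair sum of the moved queen
lemma pv_contrib (problem : List Int) (col row : Int)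
    (h0 : 0 ≤ col) (h1 : col < (problem.length : Int)) :
    pvContrib problem
      ((PySem.List.pyRange 0 (problem.length : Int)).foldl (fun d j =>
        d.insert (PySem.List.pyGetD problem j 0) (d.getD (PySem.List.pyGetD problem j 0) 0 + 1))
        (PySem.Dict.empty : PySem.Dict Int Int))
      ((PySem.List.pyRange 0 (problem.length : Int)).foldl (fun d j =>
        d.insert (PySem.List.pyGetD problem j 0 - j) (d.getD (PySem.List.pyGetD problem j 0 - j) 0 + 1))
        (PySem.Dict.empty : PySem.Dict Int Int))
      ((PySem.List.pyRange 0 (problem.length : Int)).foldl (fun d j =>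
        d.insert (PySem.List.pyGetD problem j 0 + j) (d.getD (PySem.List.pyGetD problem j 0 + j) 0 + 1))
        (PySem.Dict.empty : PySem.Dict Int Int))
      col row
      = ∑ j ∈ Finset.Ico (0 : Int) (problem.length : Int),
          (if j ≠ col then pvAtt col row j (PySem.List.pyGetD problem j 0) else 0) := by
  simp only [pvContrib]
  rw [pv_counter (fun j => PySem.List.pyGetD problem j 0),
      pv_counter (fun j => PySem.List.pyGetD problem j 0 - j),
      pv_counter (fun j => PySem.List.pyGetD problem j 0 + j)]
  simp only [PySem.Dict.getD_empty, zero_add]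
  rw [pv_sum_pyRange, pv_sum_pyRange, pv_sum_pyRange]
  have hite : ∀ c : Int, (if PySem.List.pyGetD problem col 0 = row then c - 3 else c)
      = c - (if PySem.List.pyGetD problem col 0 = row then 3 else 0) := by
    intro c; split_ifs <;> ring
  rw [hite]
  have hterm : ∀ j ∈ Finset.Ico (0 : Int) (problem.length : Int),
      ((if PySem.List.pyGetD problem j 0 = row then (1 : Int) else 0)
        + (if PySem.List.pyGetD problem j 0 - j = row - col then (1 : Int) else 0)
        + (if PySem.List.pyGetD problem j 0 + j = row + col then (1 : Int) else 0))
      = (if j ≠ col then pvAtt col row j (PySem.List.pyGetD problem j 0) else 0)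
        + (if j = col then (if PySem.List.pyGetD problem col 0 = row then (3 : Int) else 0) else 0) := by
    intro j hj
    by_cases hjc : j = col
    · subst hjc
      have hz : (if (j : Int) ≠ j then pvAtt j row j (PySem.List.pyGetD problem j 0) else 0) = (0 : Int) := by
        simp
      rw [hz, if_pos rfl]
      split_ifs <;> omega
    · rw [if_pos hjc, if_neg hjc]
      unfold pvAtt
      split_ifs <;> omega
  have hsplit2 : (∑ j ∈ Finset.Ico (0 : Int) (problem.length : Int),
        ((if PySem.List.pyGetD problem j 0 = row then (1 : Int) else 0)
          + (if PySem.List.pyGetD problem j 0 - j = row - col then (1 : Int) else 0)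
          + (if PySem.List.pyGetD problem j 0 + j = row + col then (1 : Int) else 0)))
      = (∑ j ∈ Finset.Ico (0 : Int) (problem.length : Int),
          (if PySem.List.pyGetD problem j 0 = row then (1 : Int) else 0))
        + (∑ j ∈ Finset.Ico (0 : Int) (problem.length : Int),
          (if PySem.List.pyGetD problem j 0 - j = row - col then (1 : Int) else 0))
        + (∑ j ∈ Finset.Ico (0 : Int) (problem.length : Int),
          (if PySem.List.pyGetD problem j 0 + j = row + col then (1 : Int) else 0)) := by
    rw [Finset.sum_add_distrib, Finset.sum_add_distrib]
  rw [← hsplit2, Finset.sum_congr rfl hterm, Finset.sum_add_distrib, Finset.sum_ite_eq',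
    if_pos (by rw [Finset.mem_Ico]; omega)]
  ring

-- A's per-square recount, as the split pair sum of the perturbed board
lemma pv_cellA (problem : List Int) (row col : Int)
    (h0 : 0 ≤ col) (h1 : col < (problem.length : Int)) :
    calculate_attack_cost row col problem
      = (∑ j ∈ Finset.Ico (0 : Int) (problem.length : Int),
          if j = col then 0 else ∑ i ∈ Finset.Ico (0 : Int) j,
            (if i ≠ col then
              pvAtt i (PySem.List.pyGetD problem i 0) j (PySem.List.pyGetD problem j 0)
            else 0))
        + ∑ j ∈ Finset.Ico (0 : Int) (problem.length : Int),
            (if j ≠ col then pvAtt col row j (PySem.List.pyGetD problem j 0) else 0) := by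
  simp only [calculate_attack_cost, PySem.List.len_eq]
  rw [pv_foldA_outer]
  rw [Finset.sum_comm' (t' := Finset.Ico (0 : Int) (problem.length : Int))
        (s' := fun j => Finset.Ico (0 : Int) j)
        (fun i j => by simp [Finset.mem_Ico]; omega)]
  exact pv_key (problem.length : Int) col h0 h1 _ _ _
    (fun i hi => by
      rw [Finset.mem_Ico] at hi
      rw [pvP_set problem row col i h0 h1 (by omega) (by omega),
        pvP_set problem row col col h0 h1 h0 h1, if_neg (by omega), if_pos rfl]
      exact pvAtt_symm i (PySem.List.pyGetD problem i 0) col row)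
    (fun j hj hcj => by
      rw [Finset.mem_Ico] at hj
      rw [pvP_set problem row col col h0 h1 h0 h1,
        pvP_set problem row col j h0 h1 (by omega) (by omega), if_pos rfl, if_neg (by omega)])
    (fun j hj i hi hi' hj' => by
      rw [Finset.mem_Ico] at hj hi
      rw [pvP_set problem row col i h0 h1 (by omega) (by omega),
        pvP_set problem row col j h0 h1 (by omega) (by omega), if_neg hi', if_neg hj'])

-- the unperturbed pair total splits the same way at any column
lemma pv_base (problem : List Int) (col : Int)
    (h0 : 0 ≤ col) (h1 : col < (problem.length : Int)) :
    ∑ j ∈ Finset.Ico (0 : Int) (problem.length : Int), ∑ i ∈ Finset.Ico (0 : Int) j,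
        pvAtt i (PySem.List.pyGetD problem i 0) j (PySem.List.pyGetD problem j 0)
      = (∑ j ∈ Finset.Ico (0 : Int) (problem.length : Int),
          if j = col then 0 else ∑ i ∈ Finset.Ico (0 : Int) j,
            (if i ≠ col then
              pvAtt i (PySem.List.pyGetD problem i 0) j (PySem.List.pyGetD problem j 0)
            else 0))
        + ∑ j ∈ Finset.Ico (0 : Int) (problem.length : Int),
            (if j ≠ col then
              pvAtt col (PySem.List.pyGetD problem col 0) j (PySem.List.pyGetD problem j 0)
            else 0) := by
  exact pv_key (problem.length : Int) col h0 h1 _ _ _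
    (fun i hi => pvAtt_symm i (PySem.List.pyGetD problem i 0) col (PySem.List.pyGetD problem col 0))
    (fun j hj hcj => rfl)
    (fun j hj i hi hi' hj' => rfl)

-- ===== VERDICT (by name: the statement is the Claim_ definition above) =====
theorem number_of_attacks_spec : Claim_equal_number_of_attacks := by
  intro problem _
  unfold Spec_number_of_attacks
  simp only [number_of_attacks, number_of_attacks_alt, PySem.List.len_eq]
  refine congrArg (PySem.Str.join "\n") ?_
  rw [List.map_map]
  refine List.map_congr_left (fun row hrow => ?_)
  refine congrArg (PySem.Str.join " ") ?_
  rw [List.map_map]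
  refine List.map_congr_left (fun col hcol => ?_)
  rw [PySem.List.mem_pyRange_one] at hcol
  refine congrArg pvFmt2 ?_
  rw [PySem.List.pyGetD_map_pyRange_of_nonneg _ _ col 0 hcol.1 hcol.2]
  beta_reduce
  rw [pv_total, pv_base problem col hcol.1 hcol.2,
    pv_contrib problem col (PySem.List.pyGetD problem col 0) hcol.1 hcol.2,
    pv_contrib problem col row hcol.1 hcol.2,
    pv_cellA problem row col hcol.1 hcol.2]
  ring
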